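-- pv_equiv track=rewrite | github.com/mdandre89/Codewars-exercises | string-tops/string-tops.py | tops
-- ===== SOURCE A (Python) =====
-- def tops(msg):
--     s = 1
--     i = 2
--     t = []
--     while s <= len(msg):
--         if i%2 == 0:
--             t.append(msg[s])
--         s += i
--         i += 1
--     return "".join(t[::-1])
-- ===== SOURCE B (Python) =====
-- def tops(msg):
--     t = []
--     k = 1
--     while k * (2 * k - 1) < len(msg):
--         t.append(msg[k * (2 * k - 1)])
--         k += 1
--     return "".join(reversed(t))
-- ===== Notes on version B (the rewrite author's own statement) =====
-- stated objective: simpler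
-- what changed: Replaces the running sum s and parity counter i with the closed-form index k*(2*k-1) per selected character, halving the loop steps and dropping the parity branch.
-- outside the precondition, e.g. on tops('a'): A raises IndexError, B returns ''; on tops('abcdef'): A raises IndexError, B returns 'b'
import Mathlib
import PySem

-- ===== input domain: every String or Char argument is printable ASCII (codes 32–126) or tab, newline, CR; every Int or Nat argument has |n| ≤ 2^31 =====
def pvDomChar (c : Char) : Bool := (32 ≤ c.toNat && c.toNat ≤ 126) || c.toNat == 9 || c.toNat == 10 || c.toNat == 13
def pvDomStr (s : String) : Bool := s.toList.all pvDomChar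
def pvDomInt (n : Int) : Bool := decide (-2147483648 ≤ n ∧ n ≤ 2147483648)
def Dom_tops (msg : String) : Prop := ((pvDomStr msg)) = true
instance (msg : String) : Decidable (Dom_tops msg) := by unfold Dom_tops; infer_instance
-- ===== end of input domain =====

-- B replaces A's running sum and parity counter with the closed-form index k*(2*k-1) (objective: simpler).

-- ===== PORT A =====
-- A's while loop; j encodes Python's i as i = j + 2 (i starts at 2 and only grows, so j : Nat).
-- msg[s] is ported as pyGetD with default ' ': exact whenever s < len; the case s = len (Python
-- IndexError) is excluded by Pre_tops.
def topsLoopA (msg : List Char) (s j : Nat) (t : List Char) : List Char :=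
  if s ≤ msg.length then
    topsLoopA msg (s + (j + 2)) (j + 1)
      (if (j + 2) % 2 == 0 then t ++ [PySem.List.pyGetD msg (s : Int) ' '] else t)
  else t
termination_by msg.length + 1 - s
decreasing_by omega

def tops (msg : String) : String := String.ofList (topsLoopA msg.toList 1 0 []).reverse

-- ===== PORT B =====
def topsLoopB (msg : List Char) (k : Nat) (t : List Char) : List Char :=
  if k * (2 * k - 1) < msg.length then
    topsLoopB msg (k + 1) (t ++ [PySem.List.pyGetD msg ((k * (2 * k - 1) : Nat) : Int) ' '])
  else t
termination_by msg.length - k * (2 * k - 1)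
decreasing_by
  have h1 : k * (2 * k - 1) ≤ k * (2 * k + 1) := Nat.mul_le_mul_left _ (by omega)
  have h2 : k * (2 * k + 1) < (k + 1) * (2 * k + 1) := by nlinarith
  have h3 : (k + 1) * (2 * (k + 1) - 1) = (k + 1) * (2 * k + 1) := by
    have : 2 * (k + 1) - 1 = 2 * k + 1 := by omega
    rw [this]
  omega

def tops_alt (msg : String) : String := String.ofList (topsLoopB msg.toList 1 []).reverse

-- ===== PRECONDITION & SPEC =====
-- Pre_tops excludes exactly the lengths 1, 6, 15, 28, … (len = k*(2*k-1)), on which A indexes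
-- msg[len(msg)] and raises IndexError.
def Pre_tops (msg : String) : Prop :=
  ∀ k < msg.toList.length + 1, 1 ≤ k → msg.toList.length ≠ k * (2 * k - 1)
instance (msg : String) : Decidable (Pre_tops msg) := by unfold Pre_tops; infer_instance
def pvWitness_tops : String := "abc"

def Spec_tops (msg : String) (out : String) : Prop := out = tops_alt msg
instance (msg : String) (out : String) : Decidable (Spec_tops msg out) := by unfold Spec_tops; infer_instance

-- ===== CLAIM (what is proved, stated in full; the proofs are below) =====
def Claim_equal_tops : Prop := ∀ (msg : String), Dom_tops msg → Pre_tops msg → Spec_tops msg (tops msg)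

-- ===== LEMMAS AND PROOFS =====

-- Loop correspondence: A's state after finishing step i = 2*k - 1 is s = k*(2*k-1), i = 2*k.
lemma loops_eq (msg : List Char)
    (hpre : ∀ k < msg.length + 1, 1 ≤ k → msg.length ≠ k * (2 * k - 1)) :
    ∀ (n k : Nat) (t : List Char), 1 ≤ k → msg.length + 1 - k * (2 * k - 1) ≤ n →
      topsLoopA msg (k * (2 * k - 1)) (2 * k - 2) t = topsLoopB msg k t := by
  intro n
  induction n with
  | zero =>
    intro k t hk hm
    rw [topsLoopA, topsLoopB]
    have h1 : ¬ k * (2 * k - 1) ≤ msg.length := by omega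
    have h2 : ¬ k * (2 * k - 1) < msg.length := by omega
    simp [h1, h2]
  | succ n ih =>
    intro k t hk hm
    obtain ⟨m, rfl⟩ : ∃ m, k = m + 1 := ⟨k - 1, by omega⟩
    have p1 : (m + 1) * (2 * (m + 1) - 1) = 2 * m * m + 3 * m + 1 := by
      rw [show 2 * (m + 1) - 1 = 2 * m + 1 from by omega]; ring
    have p2 : (m + 2) * (2 * (m + 2) - 1) = 2 * m * m + 7 * m + 6 := by
      rw [show 2 * (m + 2) - 1 = 2 * m + 3 from by omega]; ring
    by_cases h : (m + 1) * (2 * (m + 1) - 1) ≤ msg.length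
    · have hne : msg.length ≠ (m + 1) * (2 * (m + 1) - 1) := hpre (m + 1) (by omega) hk
      have hlt : (m + 1) * (2 * (m + 1) - 1) < msg.length := by omega
      rw [topsLoopA, if_pos h]
      rw [show 2 * (m + 1) - 2 = 2 * m from by omega]
      rw [if_pos (show ((2 * m + 2) % 2 == 0) = true by
        simp [show (2 * m + 2) % 2 = 0 from by omega])]
      rw [topsLoopA]
      by_cases h2 : (m + 1) * (2 * (m + 1) - 1) + (2 * m + 2) ≤ msg.length
      · rw [if_pos h2]
        rw [if_neg (show ¬ ((2 * m + 1 + 2) % 2 == 0) = true by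
          simp [show (2 * m + 1 + 2) % 2 = 1 from by omega])]
        rw [show (m + 1) * (2 * (m + 1) - 1) + (2 * m + 2) + (2 * m + 1 + 2)
            = (m + 2) * (2 * (m + 2) - 1) from by omega]
        rw [show 2 * m + 1 + 1 = 2 * (m + 2) - 2 from by omega]
        rw [topsLoopB, if_pos hlt]
        exact ih (m + 2) _ (by omega) (by omega)
      · rw [if_neg h2]
        rw [topsLoopB, if_pos hlt]
        rw [topsLoopB]
        rw [if_neg (show ¬ (m + 2) * (2 * (m + 2) - 1) < msg.length from by omega)]
    · rw [topsLoopA, topsLoopB]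
      have h2 : ¬ (m + 1) * (2 * (m + 1) - 1) < msg.length := by omega
      simp [h, h2]

-- ===== VERDICT (by name: the statement is the Claim_ definition above) =====
theorem tops_spec : Claim_equal_tops := by
  intro msg _ hpre
  unfold Spec_tops tops tops_alt
  have h := loops_eq msg.toList hpre (msg.toList.length + 1) 1 [] (by omega) (by omega)
  norm_num at h
  rw [h]
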